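-- pv_equiv track=rewrite | github.com/MrBrantCode/unitest_baseline | mut_generate/mist_train_taco/taco_4889/solution.py | min_jumps_to_roof
-- ===== SOURCE A (Python) =====
-- def min_jumps_to_roof(n, building_a, building_b):
--     def bfs(b):
--         mem = [[False for _ in range(n)] for _ in range(2)]
--         st = [0, 0]
--         for i in range(2):
--             if b[i][0] != 1:
--                 continue
--             while st[i] < n - 1 and b[i][st[i] + 1] == 1:
--                 st[i] += 1
--             if st[i] == n - 1:
--                 return 0
--         mem[0][st[0]] = True
--         mem[1][st[1]] = True
--         que = [[0, st[0], 0], [1, st[1], 0]]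
--         while len(que) != 0:
--             d = que.pop(0)
--             des = (d[0] + 1) % 2
--             cst = d[2] + 1
--             for i in range(3):
--                 fl = d[1] + i
--                 if fl >= n:
--                     break
--                 state = b[des][fl]
--                 if state != 2 and fl == n - 1:
--                     return cst
--                 if state == 0:
--                     if mem[des][fl] == False:
--                         que.append([des, fl, cst])
--                         mem[des][fl] = True
--                 elif state == 1:
--                     k = 1
--                     while True:
--                         if fl + k >= n:
--                             return cst
--                         if b[des][fl + k] != 1:
--                             if mem[des][fl + k - 1] == False:
--                                 que.append([des, fl + k - 1, cst])
--                                 mem[des][fl + k - 1] = True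
--                             break
--                         else:
--                             k += 1
--                 elif state == 2:
--                     k = 1
--                     while True:
--                         if b[des][fl - k] != 2:
--                             if mem[des][fl - k] == False:
--                                 que.append([des, fl - k, cst])
--                                 mem[des][fl - k] = True
--                             break
--                         else:
--                             k += 1
--         return -1
--
--     b = [building_a, building_b]
--     count = bfs(b)
--     return str(count) if count >= 0 else 'NA'
-- ===== SOURCE B (Python) =====
-- # Alternative implementation: two precomputed per-building "destination" tables (the
-- # elevator/slide/roof case analysis folded into linear passes), then a LEVEL-SYNCHRONOUS
-- # BFS: a frontier list per jump count and a flat visited array, instead of A's list.pop(0)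
-- # queue of (side, floor, cost) triples with per-visit elevator/slide rescans.
--
-- ROOF = -1
-- DEAD = -2
--
--
-- def _column(bl, n):
--     # up[j]: top floor of the 1-run strictly above j (ride target), n = ride off the roof
--     up = [0] * n
--     up[n - 1] = n
--     for j in range(n - 2, -1, -1):
--         up[j] = j if bl[j + 1] != 1 else up[j + 1]
--     col = [0] * n
--     low = 0  # highest floor i < current j with bl[i] != 2 (0 if none): slide landing
--     for j in range(n):
--         c = bl[j]
--         if c != 2 and j == n - 1:
--             col[j] = ROOF
--         elif c == 0:
--             col[j] = j
--         elif c == 1: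
--             col[j] = ROOF if up[j] == n else up[j]
--         elif c == 2:
--             col[j] = low
--         else:
--             col[j] = DEAD
--         if c != 2:
--             low = j
--     return col
--
--
-- def min_jumps_to_roof(n, building_a, building_b):
--     bs = (building_a, building_b)
--     dest = (_column(building_a, n), _column(building_b, n))
--     seen = [False] * (2 * n)
--     frontier = []
--     for s in (0, 1):
--         st = 0
--         if bs[s][0] == 1:
--             v = dest[s][0]
--             if v == ROOF:
--                 return '0'
--             st = v
--         seen[2 * st + s] = True
--         frontier.append((s, st))
--     cost = 0
--     while frontier:
--         cost += 1
--         nxt = []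
--         for s, fl in frontier:
--             t = 1 - s
--             col = dest[t]
--             for g in (fl, fl + 1, fl + 2):
--                 if g >= n:
--                     break
--                 v = col[g]
--                 if v == ROOF:
--                     return str(cost)
--                 if v >= 0 and not seen[2 * v + t]:
--                     seen[2 * v + t] = True
--                     nxt.append((t, v))
--         frontier = nxt
--     return 'NA'
-- ===== Notes on version B (the rewrite author's own statement) =====
-- stated objective: alternative
-- what changed: Replaces A's list.pop(0) queue of (side, floor, cost) triples with per-visit elevator/slide rescans by a level-synchronous BFS (one frontier list per jump count, cost kept outside the nodes) over two precomputed per-building destination tables and a flat visited array indexed by 2*floor+side.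
-- outside the precondition, e.g. on min_jumps_to_roof(9, [4819, 3, 3, 2, 0], [0, -3, 7, 10, -1, 17]): A returns 'NA', B raises IndexError; on min_jumps_to_roof(3, [0, 0, 0], [2, 2, 2]): A raises IndexError, B returns '1'; on min_jumps_to_roof(2, [2, 0], [0, 0]): A returns '1', B returns '1'
import Mathlib
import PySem

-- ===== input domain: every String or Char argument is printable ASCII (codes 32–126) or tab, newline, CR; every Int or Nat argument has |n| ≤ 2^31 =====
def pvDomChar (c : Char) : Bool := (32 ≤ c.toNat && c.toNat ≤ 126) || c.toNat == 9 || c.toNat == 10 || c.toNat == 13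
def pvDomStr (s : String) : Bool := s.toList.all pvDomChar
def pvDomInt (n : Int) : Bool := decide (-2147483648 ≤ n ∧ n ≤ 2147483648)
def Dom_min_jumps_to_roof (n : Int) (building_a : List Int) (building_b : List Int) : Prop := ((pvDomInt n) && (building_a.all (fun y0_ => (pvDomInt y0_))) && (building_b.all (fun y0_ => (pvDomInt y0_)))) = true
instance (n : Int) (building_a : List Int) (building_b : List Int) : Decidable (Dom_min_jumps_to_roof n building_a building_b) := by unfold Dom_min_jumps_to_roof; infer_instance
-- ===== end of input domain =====

-- B replaces A's pop(0) BFS of (side, floor, cost) triples with per-visit elevator/slide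
-- rescans by a level-synchronous BFS (one frontier per jump count) over precomputed
-- per-building destination tables and a flat visited array (objective: alternative).

-- ===== PORT A =====
-- A's 2×n structures b / mem: select a side, read/set a mem cell
def sideOf (b0 b1 : List Int) (des : Nat) : List Int := if des = 0 then b0 else b1

def memGet (m : List Bool × List Bool) (des fl : Nat) : Bool :=
  if des = 0 then m.1.getD fl false else m.2.getD fl false

def memSet (m : List Bool × List Bool) (des fl : Nat) : List Bool × List Bool :=
  if des = 0 then (m.1.set fl true, m.2) else (m.1, m.2.set fl true)

-- A's elevator scan `k = 1; while True: if fl+k >= n: return; if b[fl+k] != 1: land fl+k-1`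
-- (none = return cst, i.e. ride off the roof); indices stay in [0,n) within Pre_, so List.getD is exact
def findUpA (b : List Int) (n fl : Nat) : Option Nat :=
  if h : n ≤ fl + 1 then none
  else if b.getD (fl + 1) 0 ≠ 1 then some fl
  else findUpA b n (fl + 1)
termination_by n - fl
decreasing_by omega

-- A's slide scan from floor j downward: first floor ≤ j whose cell ≠ 2 (0 at the bottom;
-- within Pre_ the ground cell is ≠ 2, exactly where Python's scan stops without wrapping)
def findDownA (b : List Int) : Nat → Nat
  | 0 => 0
  | j + 1 => if b.getD (j + 1) 0 ≠ 2 then j + 1 else findDownA b j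

-- A's inner `for i in range(3)` over target floors [fl, fl+1, fl+2]: none = `return cst`
def expandA (b0 b1 : List Int) (n des cst : Nat) :
    List Nat → List (Nat × Nat × Nat) → List Bool × List Bool →
    Option (List (Nat × Nat × Nat) × (List Bool × List Bool))
  | [], que, mem => some (que, mem)
  | g :: gs, que, mem =>
    if n ≤ g then some (que, mem)  -- break
    else
      let state := (sideOf b0 b1 des).getD g 0
      if state ≠ 2 ∧ g = n - 1 then none  -- roof reached
      else if state = 0 then
        if memGet mem des g = false then
          expandA b0 b1 n des cst gs (que ++ [(des, g, cst)]) (memSet mem des g)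
        else expandA b0 b1 n des cst gs que mem
      else if state = 1 then
        match findUpA (sideOf b0 b1 des) n g with
        | none => none
        | some j =>
          if memGet mem des j = false then
            expandA b0 b1 n des cst gs (que ++ [(des, j, cst)]) (memSet mem des j)
          else expandA b0 b1 n des cst gs que mem
      else if state = 2 then
        let j := findDownA (sideOf b0 b1 des) (g - 1)
        if memGet mem des j = false then
          expandA b0 b1 n des cst gs (que ++ [(des, j, cst)]) (memSet mem des j)
        else expandA b0 b1 n des cst gs que mem
      else expandA b0 b1 n des cst gs que mem

-- A's `while len(que) != 0` with que.pop(0); the fuel only makes the loop total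
-- (2n+4 pops are enough: every push marks a fresh one of the 2n mem cells)
def loopA (b0 b1 : List Int) (n : Nat) :
    Nat → List (Nat × Nat × Nat) → List Bool × List Bool → Int
  | 0, _, _ => -1
  | _ + 1, [], _ => -1
  | fuel + 1, (des, fl, cst) :: rest, mem =>
    match expandA b0 b1 n ((des + 1) % 2) (cst + 1) [fl, fl + 1, fl + 2] rest mem with
    | none => Int.ofNat (cst + 1)
    | some (que', mem') => loopA b0 b1 n fuel que' mem'

-- A's initial `st[i]` scan (none = `return 0`)
def initSideA (b : List Int) (n : Nat) : Option Nat :=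
  if b.getD 0 0 = 1 then findUpA b n 0 else some 0

def min_jumps_to_roof (n : Int) (building_a : List Int) (building_b : List Int) : String :=
  let nn := n.toNat
  match initSideA building_a nn with
  | none => "0"
  | some s0 =>
    match initSideA building_b nn with
    | none => "0"
    | some s1 =>
      let mem := ((List.replicate nn false).set s0 true, (List.replicate nn false).set s1 true)
      let cnt := loopA building_a building_b nn (2 * nn + 4) [(0, s0, 0), (1, s1, 0)] mem
      if cnt ≥ 0 then PySem.Int.toStr cnt else "NA"

-- ===== PORT B =====
-- Source B's flat `seen` array of length 2n, indexed 2*floor + side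
def visGet (seen : List Bool) (t v : Nat) : Bool := seen.getD (2 * v + t) false

def visMark (seen : List Bool) (t v : Nat) : List Bool := seen.set (2 * v + t) true

-- Source B `up` table, filled right-to-left (built here as a list growing on the left;
-- entry j is `j if bl[j+1] != 1 else up[j+1]`, with n at the top)
def upTbl (b : List Int) (n : Nat) : Nat → List Nat
  | 0 => []
  | k + 1 =>
    let rest := upTbl b n k
    (if k = 0 then n else
      if b.getD (n - (k + 1) + 1) 0 ≠ 1 then n - (k + 1) else rest.getD 0 n) :: rest

-- Source B `_column`: the `col`/`low` left-to-right pass; the list is built newest-first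
-- (Python fills index j in increasing j), so col[j] sits at position n-1-j
def colAux (b : List Int) (up : List Nat) (n : Nat) : Nat → List Int × Nat
  | 0 => ([], 0)
  | k + 1 =>
    let (acc, low) := colAux b up n k
    let c := b.getD k 0
    let v : Int :=
      if c ≠ 2 ∧ k = n - 1 then -1  -- ROOF
      else if c = 0 then Int.ofNat k
      else if c = 1 then (if up.getD k n = n then -1 else Int.ofNat (up.getD k n))
      else if c = 2 then Int.ofNat low
      else -2  -- DEAD
    (v :: acc, if c ≠ 2 then k else low)

def column (b : List Int) (n : Nat) : List Int :=
  ((colAux b (upTbl b n n) n n).1).reverse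

-- Source B inner `for g in (fl, fl+1, fl+2)` for ONE frontier node: read the destination
-- table, collect fresh landings onto `nxt`; none = `return str(cost)`
def expandNode (col : List Int) (n t : Nat) :
    List Nat → List (Nat × Nat) → List Bool → Option (List (Nat × Nat) × List Bool)
  | [], nxt, seen => some (nxt, seen)
  | g :: gs, nxt, seen =>
    if n ≤ g then some (nxt, seen)  -- break
    else
      let v := col.getD g (-2)
      if v = -1 then none  -- ROOF
      else if 0 ≤ v ∧ visGet seen t v.toNat = false then
        expandNode col n t gs (nxt ++ [(t, v.toNat)]) (visMark seen t v.toNat)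
      else expandNode col n t gs nxt seen

-- Source B `for s, fl in frontier`: expand a whole level, accumulating the next frontier
def expandLevel (col0 col1 : List Int) (n : Nat) :
    List (Nat × Nat) → List (Nat × Nat) → List Bool →
    Option (List (Nat × Nat) × List Bool)
  | [], nxt, seen => some (nxt, seen)
  | (s, fl) :: rest, nxt, seen =>
    match expandNode (if 1 - s = 0 then col0 else col1) n (1 - s) [fl, fl + 1, fl + 2] nxt seen with
    | none => none
    | some (nxt', seen') => expandLevel col0 col1 n rest nxt' seen'

-- Source B `while frontier`: one recursion step per BFS level; the fuel only makes the loop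
-- total (each later level marks at least one of the 2n cells fresh)
def levels (col0 col1 : List Int) (n : Nat) :
    Nat → Nat → List (Nat × Nat) → List Bool → Option Nat
  | 0, _, _, _ => none
  | fuel + 1, cost, frontier, seen =>
    match frontier with
    | [] => none
    | _ :: _ =>
      match expandLevel col0 col1 n frontier [] seen with
      | none => some (cost + 1)
      | some (nxt, seen') => levels col0 col1 n fuel (cost + 1) nxt seen'

-- Source B start floors (none = `return '0'`)
def startFloor (b : List Int) (col : List Int) : Option Nat :=
  if b.getD 0 0 = 1 then
    (if col.getD 0 (-2) = -1 then none else some (col.getD 0 (-2)).toNat)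
  else some 0

def min_jumps_to_roof_alt (n : Int) (building_a : List Int) (building_b : List Int) : String :=
  let nn := n.toNat
  let col0 := column building_a nn
  let col1 := column building_b nn
  match startFloor building_a col0 with
  | none => "0"
  | some s0 =>
    match startFloor building_b col1 with
    | none => "0"
    | some s1 =>
      let seen := ((List.replicate (2 * nn) false).set (2 * s0) true).set (2 * s1 + 1) true
      match levels col0 col1 nn (2 * nn + 4) 0 [(0, s0), (1, s1)] seen with
      | none => "NA"
      | some c => PySem.Int.toStr (Int.ofNat c)

-- ===== PRECONDITION & SPEC =====
-- Pre_ = the problem's input format, where Python A returns cleanly: n ≥ 1 and buildings of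
-- length ≥ n (on shorter lists A's indexing either raises IndexError or, when the BFS stops
-- early, happens to return while B's n-sized tables raise), and no slide (2) on either ground
-- floor — there A's downward slide scan indexes negatively, wrapping around or raising
-- IndexError, an accident of the implementation (excluded examples are cited in claim.json).
def Pre_min_jumps_to_roof (n : Int) (building_a : List Int) (building_b : List Int) : Prop :=
  1 ≤ n ∧ n ≤ (building_a.length : Int) ∧ n ≤ (building_b.length : Int) ∧
    building_a.getD 0 0 ≠ 2 ∧ building_b.getD 0 0 ≠ 2

instance (n : Int) (building_a : List Int) (building_b : List Int) :
    Decidable (Pre_min_jumps_to_roof n building_a building_b) := by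
  unfold Pre_min_jumps_to_roof; infer_instance

def pvWitness_min_jumps_to_roof : Int × List Int × List Int := (3, [0, 1, 0], [0, 2, 0])

def Spec_min_jumps_to_roof (n : Int) (building_a : List Int) (building_b : List Int) (out : String) : Prop := out = min_jumps_to_roof_alt n building_a building_b
instance (n : Int) (building_a : List Int) (building_b : List Int) (out : String) : Decidable (Spec_min_jumps_to_roof n building_a building_b out) := by unfold Spec_min_jumps_to_roof; infer_instance

-- ===== CLAIM (what is proved, stated in full; the proofs are below) =====
def Claim_equal_min_jumps_to_roof : Prop := ∀ (n : Int) (building_a : List Int) (building_b : List Int), Dom_min_jumps_to_roof n building_a building_b → Pre_min_jumps_to_roof n building_a building_b → Spec_min_jumps_to_roof n building_a building_b (min_jumps_to_roof n building_a building_b)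

-- ===== LEMMAS AND PROOFS =====

-- encode findUpA's option as the table's sentinel value
def encUp (n : Nat) : Option Nat → Nat
  | none => n
  | some x => x

theorem findUpA_lt (b : List Int) (n fl x : Nat) (h : findUpA b n fl = some x) : x + 1 < n := by
  fun_induction findUpA b n fl <;> simp_all

theorem findDownA_le (b : List Int) (j : Nat) : findDownA b j ≤ j := by
  induction j with
  | zero => simp [findDownA]
  | succ j ih => rw [findDownA]; split <;> omega

-- the up-table is findUpA, pointwise
theorem upTbl_spec (b : List Int) (n : Nat) :
    ∀ k, k ≤ n → ∀ i, (upTbl b n k).getD i n = encUp n (findUpA b n (n - k + i)) := by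
  intro k
  induction k with
  | zero =>
    intro _ i
    have h : findUpA b n (n - 0 + i) = none := by
      rw [findUpA]; simp; omega
    rw [h]
    simp [upTbl, encUp]
  | succ k ih =>
    intro hk i
    match i with
    | 0 =>
      simp only [upTbl, List.getD_cons_zero, Nat.add_zero]
      by_cases hk0 : k = 0
      · subst hk0
        have h : findUpA b n (n - 1) = none := by rw [findUpA]; simp; omega
        rw [h]
        simp [encUp]
      · have h1 : ¬ n ≤ (n - (k + 1)) + 1 := by omega
        rw [if_neg hk0]
        rw [findUpA, dif_neg h1]
        have hh := ih (by omega) 0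
        rw [Nat.add_zero] at hh
        have harg : n - (k + 1) + 1 = n - k := by omega
        rw [harg]
        rw [List.getD_eq_getElem?_getD] at hh
        by_cases hb : b[n - k]?.getD 0 = 1 <;> simp [hb, encUp, hh]
    | i + 1 =>
      have hh := ih (by omega) i
      have harg : n - (k + 1) + (i + 1) = n - k + i := by omega
      simp only [upTbl, List.getD_cons_succ, harg]
      exact hh

-- colSpec: what Source B's destination table holds, expressed through A's scans
def colSpec (b : List Int) (n j : Nat) : Int :=
  let c := b.getD j 0
  if c ≠ 2 ∧ j = n - 1 then -1
  else if c = 0 then Int.ofNat j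
  else if c = 1 then (if encUp n (findUpA b n j) = n then -1 else Int.ofNat (encUp n (findUpA b n j)))
  else if c = 2 then Int.ofNat (findDownA b (j - 1))
  else -2

theorem colAux_spec (b : List Int) (n : Nat) :
    ∀ k, colAux b (upTbl b n n) n k =
      (((List.range k).map (colSpec b n)).reverse, findDownA b (k - 1)) := by
  intro k
  induction k with
  | zero => simp [colAux, findDownA]
  | succ k ih =>
    rw [colAux, ih]
    simp only [List.range_succ, List.map_append, List.reverse_append]
    rw [Prod.mk.injEq]
    constructor
    · have hu : (upTbl b n n)[k]?.getD n = encUp n (findUpA b n k) := by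
        simpa using upTbl_spec b n n (le_refl n) k
      simp [colSpec, List.getD_eq_getElem?_getD, hu]
    · -- low update = findDownA at k
      show (if b.getD k 0 ≠ 2 then k else findDownA b (k - 1)) = findDownA b (k + 1 - 1)
      rw [Nat.add_sub_cancel]
      cases k with
      | zero => simp [findDownA]
      | succ k' => simp only [findDownA, Nat.add_sub_cancel]

theorem column_eq (b : List Int) (n : Nat) :
    column b n = (List.range n).map (colSpec b n) := by
  simp [column, colAux_spec b n n]

theorem column_getD (b : List Int) (n j : Nat) (hj : j < n) :
    (column b n).getD j (-2) = colSpec b n j := by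
  rw [column_eq]
  rw [List.getD_eq_getElem?_getD]
  simp [hj]

-- ---- the visited-array correspondence: flat seen (2*floor+side) vs A's pair of lists ----
def fcM (m : List Bool × List Bool) : Nat := m.1.count false + m.2.count false
def fcS (seen : List Bool) : Nat := seen.count false

def RV (n : Nat) (seen : List Bool) (m : List Bool × List Bool) : Prop :=
  seen.length = 2 * n ∧ m.1.length = n ∧ m.2.length = n ∧
    ∀ t v, t < 2 → v < n → seen.getD (2 * v + t) false = memGet m t v

theorem count_set_true (l : List Bool) (i : Nat) (h : l[i]? = some false) :
    (l.set i true).count false + 1 = l.count false := by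
  induction l generalizing i with
  | nil => simp at h
  | cons a tl ih =>
    cases i with
    | zero =>
      simp only [List.getElem?_cons_zero, Option.some.injEq] at h
      subst h
      simp
    | succ i =>
      simp only [List.getElem?_cons_succ] at h
      have := ih i h
      simp only [List.set_cons_succ, List.count_cons]
      omega

theorem getD_set_true (l : List Bool) (i k : Nat) :
    (l.set i true).getD k false = if i = k ∧ i < l.length then true else l.getD k false := by
  simp only [List.getD_eq_getElem?_getD, List.getElem?_set]
  by_cases hik : i = k
  · subst hik
    by_cases hl : i < l.length
    · simp [hl]
    · rw [List.getElem?_eq_none (by omega)]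
      simp [hl]
  · simp [hik]

theorem memGet_memSet (n : Nat) (m : List Bool × List Bool) (t j t' v' : Nat)
    (h1 : m.1.length = n) (h2 : m.2.length = n) (ht : t < 2) (ht2 : t' < 2) :
    memGet (memSet m t j) t' v' = if t = t' ∧ j = v' ∧ j < n then true else memGet m t' v' := by
  interval_cases t <;> interval_cases t'
  · show (m.1.set j true).getD v' false
      = if (0 : Nat) = 0 ∧ j = v' ∧ j < n then true else memGet m 0 v'
    rw [getD_set_true, h1]
    by_cases hjv : j = v' ∧ j < n
    · rw [if_pos hjv, if_pos ⟨rfl, hjv⟩]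
    · rw [if_neg hjv, if_neg (fun h => hjv h.2)]
      rfl
  · show m.2.getD v' false
      = if (0 : Nat) = 1 ∧ j = v' ∧ j < n then true else memGet m 1 v'
    rw [if_neg (by omega : ¬ ((0 : Nat) = 1 ∧ j = v' ∧ j < n))]
    rfl
  · show m.1.getD v' false
      = if (1 : Nat) = 0 ∧ j = v' ∧ j < n then true else memGet m 0 v'
    rw [if_neg (by omega : ¬ ((1 : Nat) = 0 ∧ j = v' ∧ j < n))]
    rfl
  · show (m.2.set j true).getD v' false
      = if (1 : Nat) = 1 ∧ j = v' ∧ j < n then true else memGet m 1 v'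
    rw [getD_set_true, h2]
    by_cases hjv : j = v' ∧ j < n
    · rw [if_pos hjv, if_pos ⟨rfl, hjv⟩]
    · rw [if_neg hjv, if_neg (fun h => hjv h.2)]
      rfl

theorem RV_mark (n : Nat) (seen : List Bool) (m : List Bool × List Bool) (t j : Nat)
    (hR : RV n seen m) (ht : t < 2) (hj : j < n) :
    RV n (visMark seen t j) (memSet m t j) := by
  obtain ⟨hl, h1, h2, hpt⟩ := hR
  refine ⟨by simp [visMark, hl], ?_, ?_, ?_⟩
  · interval_cases t <;> simp [memSet, h1]
  · interval_cases t <;> simp [memSet, h2]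
  · intro t' v' ht' hv'
    rw [visMark, getD_set_true, memGet_memSet n m t j t' v' h1 h2 ht ht', hl]
    by_cases heq : t = t' ∧ j = v'
    · obtain ⟨e1, e2⟩ := heq
      have c1 : 2 * j + t = 2 * v' + t' ∧ 2 * j + t < 2 * n := by omega
      rw [if_pos c1, if_pos ⟨e1, e2, hj⟩]
    · have hne : ¬ (2 * j + t = 2 * v' + t' ∧ 2 * j + t < 2 * n) := by
        intro hcc
        exact heq (by omega)
      rw [if_neg hne, if_neg (by tauto), hpt t' v' ht' hv']

theorem fcS_mark (n : Nat) (seen : List Bool) (m : List Bool × List Bool) (t j : Nat)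
    (hR : RV n seen m) (ht : t < 2) (hj : j < n) (hf : memGet m t j = false) :
    fcS (visMark seen t j) + 1 = fcS seen := by
  obtain ⟨hl, _, _, hpt⟩ := hR
  have hin : 2 * j + t < seen.length := by omega
  have hg : seen.getD (2 * j + t) false = false := by rw [hpt t j ht hj]; exact hf
  have hsome : seen[2 * j + t]? = some false := by
    rw [List.getElem?_eq_getElem hin]
    rw [List.getD_eq_getElem?_getD, List.getElem?_eq_getElem hin] at hg
    simp at hg
    simp [hg]
  exact count_set_true seen (2 * j + t) hsome

theorem fcM_mark (n : Nat) (m : List Bool × List Bool) (t j : Nat)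
    (h1 : m.1.length = n) (h2 : m.2.length = n) (ht : t < 2) (hj : j < n)
    (hf : memGet m t j = false) :
    fcM (memSet m t j) + 1 = fcM m := by
  interval_cases t
  · have hf' : m.1.getD j false = false := hf
    have hsome : m.1[j]? = some false := by
      rw [List.getD_eq_getElem?_getD, List.getElem?_eq_getElem (by omega : j < m.1.length)] at hf'
      rw [List.getElem?_eq_getElem (by omega : j < m.1.length)]
      simp only [Option.getD_some] at hf'
      simp [hf']
    have hc := count_set_true m.1 j hsome
    show (m.1.set j true).count false + m.2.count false + 1 = m.1.count false + m.2.count false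
    omega
  · have hf' : m.2.getD j false = false := hf
    have hsome : m.2[j]? = some false := by
      rw [List.getD_eq_getElem?_getD, List.getElem?_eq_getElem (by omega : j < m.2.length)] at hf'
      rw [List.getElem?_eq_getElem (by omega : j < m.2.length)]
      simp only [Option.getD_some] at hf'
      simp [hf']
    have hc := count_set_true m.2 j hsome
    show m.1.count false + (m.2.set j true).count false + 1 = m.1.count false + m.2.count false
    omega

-- ---- one frontier node: A's expandA vs B's expandNode over the destination table ----
theorem nodeRel (b0 b1 : List Int) (n t cst : Nat) (ht : t < 2) :
    ∀ gs que nxt seen mem, RV n seen mem →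
      (expandA b0 b1 n t cst gs que mem = none ∧
        expandNode (if t = 0 then column b0 n else column b1 n) n t gs nxt seen = none) ∨
      (∃ (X : List Nat) (seen' : List Bool) (mem' : List Bool × List Bool),
        expandA b0 b1 n t cst gs que mem
          = some (que ++ X.map (fun j => (t, j, cst)), mem') ∧
        expandNode (if t = 0 then column b0 n else column b1 n) n t gs nxt seen
          = some (nxt ++ X.map (fun j => (t, j)), seen') ∧
        RV n seen' mem' ∧ (∀ j ∈ X, j < n) ∧
        fcM mem' + X.length = fcM mem ∧ fcS seen' + X.length = fcS seen) := by
  intro gs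
  induction gs with
  | nil =>
    intro que nxt seen mem hR
    right
    exact ⟨[], seen, mem, by simp [expandA], by simp [expandNode], hR, by simp, by simp, by simp⟩
  | cons g gs ih =>
    intro que nxt seen mem hR
    by_cases hg : n ≤ g
    · right
      exact ⟨[], seen, mem, by simp [expandA, hg], by simp [expandNode, hg], hR, by simp, by simp,
        by simp⟩
    · have hcol : (if t = 0 then column b0 n else column b1 n).getD g (-2)
          = colSpec (sideOf b0 b1 t) n g := by
        have hg' : g < n := by omega
        by_cases ht0 : t = 0
        · rw [if_pos ht0, ht0]; simp only [sideOf, if_pos]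
          exact column_getD b0 n g hg'
        · rw [if_neg ht0]; simp only [sideOf, if_neg ht0]
          exact column_getD b1 n g hg'
      have hBstep : ∀ nxt seen,
          expandNode (if t = 0 then column b0 n else column b1 n) n t (g :: gs) nxt seen =
          (if colSpec (sideOf b0 b1 t) n g = -1 then none
           else if 0 ≤ colSpec (sideOf b0 b1 t) n g ∧
               visGet seen t (colSpec (sideOf b0 b1 t) n g).toNat = false then
             expandNode (if t = 0 then column b0 n else column b1 n) n t gs
               (nxt ++ [(t, (colSpec (sideOf b0 b1 t) n g).toNat)])
               (visMark seen t (colSpec (sideOf b0 b1 t) n g).toNat)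
           else expandNode (if t = 0 then column b0 n else column b1 n) n t gs nxt seen) := by
        intro nxt seen
        rw [expandNode]
        simp only [if_neg hg, hcol]
      set c := (sideOf b0 b1 t).getD g 0 with hc
      by_cases hroof : c ≠ 2 ∧ g = n - 1
      · left
        constructor
        · rw [expandA]; simp only [if_neg hg, ← hc, if_pos hroof]
        · have hcs : colSpec (sideOf b0 b1 t) n g = -1 := by
            simp only [colSpec, ← hc]
            rw [if_pos hroof]
          rw [hBstep nxt seen, hcs]
          simp
      · have hA : expandA b0 b1 n t cst (g :: gs) que mem =
            (if c = 0 then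
              (if memGet mem t g = false then
                expandA b0 b1 n t cst gs (que ++ [(t, g, cst)]) (memSet mem t g)
              else expandA b0 b1 n t cst gs que mem)
            else if c = 1 then
              (match findUpA (sideOf b0 b1 t) n g with
               | none => none
               | some j =>
                 if memGet mem t j = false then
                   expandA b0 b1 n t cst gs (que ++ [(t, j, cst)]) (memSet mem t j)
                 else expandA b0 b1 n t cst gs que mem)
            else if c = 2 then
              (if memGet mem t (findDownA (sideOf b0 b1 t) (g - 1)) = false then
                expandA b0 b1 n t cst gs (que ++ [(t, findDownA (sideOf b0 b1 t) (g - 1), cst)])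
                  (memSet mem t (findDownA (sideOf b0 b1 t) (g - 1)))
              else expandA b0 b1 n t cst gs que mem)
            else expandA b0 b1 n t cst gs que mem) := by
          rw [expandA]; simp only [if_neg hg, ← hc, if_neg hroof]
        -- the push case, shared by the three landing branches
        have usepush : ∀ (j : Nat), j < n → memGet mem t j = false →
            ((expandA b0 b1 n t cst gs (que ++ [(t, j, cst)]) (memSet mem t j) = none ∧
              expandNode (if t = 0 then column b0 n else column b1 n) n t gs
                (nxt ++ [(t, j)]) (visMark seen t j) = none) ∨
             (∃ (X : List Nat) (seen' : List Bool) (mem' : List Bool × List Bool),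
              expandA b0 b1 n t cst gs (que ++ [(t, j, cst)]) (memSet mem t j)
                = some (que ++ X.map (fun i => (t, i, cst)), mem') ∧
              expandNode (if t = 0 then column b0 n else column b1 n) n t gs
                (nxt ++ [(t, j)]) (visMark seen t j)
                = some (nxt ++ X.map (fun i => (t, i)), seen') ∧
              RV n seen' mem' ∧ (∀ i ∈ X, i < n) ∧
              fcM mem' + X.length = fcM mem ∧ fcS seen' + X.length = fcS seen)) := by
          intro j hj hm
          have hR' := RV_mark n seen mem t j hR ht hj
          have hfm := fcM_mark n mem t j hR.2.1 hR.2.2.1 ht hj hm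
          have hfs := fcS_mark n seen mem t j hR ht hj hm
          rcases ih (que ++ [(t, j, cst)]) (nxt ++ [(t, j)]) (visMark seen t j) (memSet mem t j)
              hR' with h | ⟨X, s', m', ha, hb, hr, hx, hfm', hfs'⟩
          · left; exact h
          · right
            refine ⟨j :: X, s', m', by simpa using ha, by simpa using hb, hr, ?_, ?_, ?_⟩
            · intro i hi
              rcases List.mem_cons.mp hi with h | h
              · omega
              · exact hx i h
            · simp only [List.length_cons]; omega
            · simp only [List.length_cons]; omega
        by_cases h0 : c = 0
        · have hcs : colSpec (sideOf b0 b1 t) n g = (g : Int) := by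
            simp only [colSpec, ← hc]
            rw [if_neg hroof, if_pos h0]
            simp
          have hgn : g < n := by omega
          have hvg : visGet seen t g = memGet mem t g := hR.2.2.2 t g ht hgn
          rw [hA, if_pos h0, hBstep nxt seen, hcs]
          rw [if_neg (by omega : ¬ ((g : Int)) = -1)]
          simp only [Int.toNat_natCast]
          by_cases hm : memGet mem t g = false
          · rw [if_pos (show (0 : Int) ≤ (g : Int) ∧ visGet seen t g = false from
              ⟨by omega, by rw [hvg]; exact hm⟩), if_pos hm]
            exact usepush g hgn hm
          · rw [if_neg (show ¬ ((0 : Int) ≤ (g : Int) ∧ visGet seen t g = false) from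
              fun h => hm (hvg ▸ h.2)), if_neg hm]
            exact ih que nxt seen mem hR
        · by_cases h1' : c = 1
          · cases hup : findUpA (sideOf b0 b1 t) n g with
            | none =>
              have hcs : colSpec (sideOf b0 b1 t) n g = -1 := by
                simp only [colSpec, ← hc]
                rw [if_neg hroof, if_neg h0, if_pos h1', hup]
                simp [encUp]
              left
              constructor
              · rw [hA, if_neg h0, if_pos h1']
                simp only [hup]
              · rw [hBstep nxt seen, hcs]
                simp
            | some j =>
              have hjn : j + 1 < n := findUpA_lt _ _ _ _ hup
              have hcs : colSpec (sideOf b0 b1 t) n g = (j : Int) := by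
                simp only [colSpec, ← hc]
                rw [if_neg hroof, if_neg h0, if_pos h1', hup]
                simp only [encUp]
                rw [if_neg (by omega)]
                simp
              have hvg : visGet seen t j = memGet mem t j := hR.2.2.2 t j ht (by omega)
              rw [hA, if_neg h0, if_pos h1', hBstep nxt seen, hcs]
              simp only [hup]
              rw [if_neg (by omega : ¬ ((j : Int)) = -1)]
              simp only [Int.toNat_natCast]
              by_cases hm : memGet mem t j = false
              · rw [if_pos (show (0 : Int) ≤ (j : Int) ∧ visGet seen t j = false from
                  ⟨by omega, by rw [hvg]; exact hm⟩), if_pos hm]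
                exact usepush j (by omega) hm
              · rw [if_neg (show ¬ ((0 : Int) ≤ (j : Int) ∧ visGet seen t j = false) from
                  fun h => hm (hvg ▸ h.2)), if_neg hm]
                exact ih que nxt seen mem hR
          · by_cases h2' : c = 2
            · have hdn : findDownA (sideOf b0 b1 t) (g - 1) < n := by
                have := findDownA_le (sideOf b0 b1 t) (g - 1)
                omega
              have hcs : colSpec (sideOf b0 b1 t) n g =
                  Int.ofNat (findDownA (sideOf b0 b1 t) (g - 1)) := by
                simp only [colSpec, ← hc]
                rw [if_neg hroof, if_neg h0, if_neg h1', if_pos h2']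
              have hvg : visGet seen t (findDownA (sideOf b0 b1 t) (g - 1))
                  = memGet mem t (findDownA (sideOf b0 b1 t) (g - 1)) :=
                hR.2.2.2 t _ ht hdn
              rw [hA, if_neg h0, if_neg h1', if_pos h2', hBstep nxt seen, hcs]
              simp only [Int.ofNat_eq_natCast, Int.toNat_natCast]
              rw [if_neg (by omega :
                ¬ ((findDownA (sideOf b0 b1 t) (g - 1) : Nat) : Int) = -1)]
              by_cases hm : memGet mem t (findDownA (sideOf b0 b1 t) (g - 1)) = false
              · rw [if_pos (show (0 : Int) ≤ ((findDownA (sideOf b0 b1 t) (g - 1) : Nat) : Int) ∧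
                    visGet seen t (findDownA (sideOf b0 b1 t) (g - 1)) = false from
                  ⟨by omega, by rw [hvg]; exact hm⟩), if_pos hm]
                exact usepush _ hdn hm
              · rw [if_neg (show ¬ ((0 : Int) ≤ ((findDownA (sideOf b0 b1 t) (g - 1) : Nat) : Int) ∧
                    visGet seen t (findDownA (sideOf b0 b1 t) (g - 1)) = false) from
                  fun h => hm (hvg ▸ h.2)), if_neg hm]
                exact ih que nxt seen mem hR
            · have hcs : colSpec (sideOf b0 b1 t) n g = -2 := by
                simp only [colSpec, ← hc]
                rw [if_neg hroof, if_neg h0, if_neg h1', if_neg h2']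
              rw [hA, if_neg h0, if_neg h1', if_neg h2', hBstep nxt seen, hcs]
              rw [if_neg (by omega : ¬ ((-2 : Int)) = -1)]
              rw [if_neg (show ¬ ((0 : Int) ≤ (-2 : Int) ∧
                  visGet seen t ((-2 : Int)).toNat = false) from fun h => by
                    have := h.1; omega)]
              exact ih que nxt seen mem hR

-- ---- one BFS level: |rest| pops of A = one pass of expandLevel ----
theorem levelRel (b0 b1 : List Int) (n cost : Nat) :
    ∀ (rest : List (Nat × Nat)) (f : Nat) nxtacc seen mem, RV n seen mem →
      (∀ p ∈ rest, p.1 < 2) → (∀ p ∈ nxtacc, p.1 < 2 ∧ p.2 < n) →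
      (expandLevel (column b0 n) (column b1 n) n rest nxtacc seen = none ∧
        loopA b0 b1 n (rest.length + f)
          (rest.map (fun p => (p.1, p.2, cost)) ++ nxtacc.map (fun p => (p.1, p.2, cost + 1))) mem
          = Int.ofNat (cost + 1)) ∨
      (∃ nxt seen' mem' k,
        expandLevel (column b0 n) (column b1 n) n rest nxtacc seen = some (nxt, seen') ∧
        loopA b0 b1 n (rest.length + f)
          (rest.map (fun p => (p.1, p.2, cost)) ++ nxtacc.map (fun p => (p.1, p.2, cost + 1))) mem
          = loopA b0 b1 n f (nxt.map (fun p => (p.1, p.2, cost + 1))) mem' ∧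
        RV n seen' mem' ∧ (∀ p ∈ nxt, p.1 < 2 ∧ p.2 < n) ∧
        nxt.length = nxtacc.length + k ∧ fcM mem' + k = fcM mem ∧ fcS seen' + k = fcS seen) := by
  intro rest
  induction rest with
  | nil =>
    intro f nxtacc seen mem hR _ hacc
    right
    exact ⟨nxtacc, seen, mem, 0, by simp [expandLevel], by simp, hR, hacc, by simp, by simp,
      by simp⟩
  | cons p rest ih =>
    obtain ⟨s, fl⟩ := p
    intro f nxtacc seen mem hR hrest hacc
    have hs : s < 2 := by simpa using hrest (s, fl) (by simp)
    have hdes : (s + 1) % 2 = 1 - s := by omega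
    have ht : 1 - s < 2 := by omega
    have hfuel : (((s, fl) :: rest).length + f) = (rest.length + f) + 1 := by
      simp [Nat.add_right_comm]
    rw [hfuel]
    simp only [List.map_cons, List.cons_append]
    rw [expandLevel, loopA, hdes]
    rcases nodeRel b0 b1 n (1 - s) (cost + 1) ht [fl, fl + 1, fl + 2]
        (rest.map (fun p => (p.1, p.2, cost)) ++ nxtacc.map (fun p => (p.1, p.2, cost + 1)))
        nxtacc seen mem hR with ⟨hAn, hBn⟩ | ⟨X, s', m', hAs, hBs, hr, hx, hfm, hfs⟩
    · left
      refine ⟨?_, ?_⟩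
      · simp only [hBn]
      · simp only [hAn]
    · have hqmass :
          (rest.map (fun p => (p.1, p.2, cost)) ++ nxtacc.map (fun p => (p.1, p.2, cost + 1)))
              ++ X.map (fun j => (1 - s, j, cost + 1))
            = rest.map (fun p => (p.1, p.2, cost))
              ++ (nxtacc ++ X.map (fun j => (1 - s, j))).map (fun p => (p.1, p.2, cost + 1)) := by
        simp [List.map_map, Function.comp_def]
      have hacc' : ∀ p ∈ nxtacc ++ X.map (fun j => (1 - s, j)), p.1 < 2 ∧ p.2 < n := by
        intro p hp
        rcases List.mem_append.mp hp with h | h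
        · exact hacc p h
        · obtain ⟨j, hj, rfl⟩ := List.mem_map.mp h
          exact ⟨ht, hx j hj⟩
      rcases ih f (nxtacc ++ X.map (fun j => (1 - s, j))) s' m' hr
          (fun p hp => hrest p (List.mem_cons_of_mem _ hp)) hacc' with
        ⟨hEL', hLA'⟩ | ⟨nxt, s2, m2, k2, hEL', hLA', hr2, hn2, hlen2, hfm2, hfs2⟩
      · left
        refine ⟨?_, ?_⟩
        · simp only [hBs]
          exact hEL'
        · simp only [hAs]
          rw [hqmass]
          exact hLA'
      · right
        refine ⟨nxt, s2, m2, X.length + k2, ?_, ?_, hr2, hn2, ?_, ?_, ?_⟩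
        · simp only [hBs]
          exact hEL'
        · simp only [hAs]
          rw [hqmass]
          exact hLA'
        · simp only [List.length_append, List.length_map] at hlen2
          omega
        · omega
        · omega

theorem loopA_nil (b0 b1 : List Int) (n : Nat) (mem : List Bool × List Bool) :
    ∀ f, loopA b0 b1 n f [] mem = -1 := by
  intro f; cases f <;> simp [loopA]

theorem levels_nil (col0 col1 : List Int) (n cost : Nat) (seen : List Bool) :
    ∀ g, levels col0 col1 n g cost [] seen = none := by
  intro g; cases g <;> simp [levels]

-- ---- whole BFS: A's pop-by-pop loop vs B's level loop, fuels normalized by fresh marks ----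
theorem simLoop (b0 b1 : List Int) (n : Nat) :
    ∀ (fc : Nat) (frontier : List (Nat × Nat)) cost seen mem f g,
      RV n seen mem → fcS seen = fc → (∀ p ∈ frontier, p.1 < 2) →
      frontier.length + fcM mem ≤ f → 1 + fcS seen ≤ g →
      loopA b0 b1 n f (frontier.map (fun p => (p.1, p.2, cost))) mem =
        (match levels (column b0 n) (column b1 n) n g cost frontier seen with
         | none => -1 | some c => Int.ofNat c) := by
  intro fc
  induction fc using Nat.strong_induction_on with
  | _ fc SIH =>
    intro frontier cost seen mem f g hR hfc hfr hf hg
    cases frontier with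
    | nil =>
      simp only [List.map_nil, loopA_nil, levels_nil]
    | cons p rest =>
      obtain ⟨g', rfl⟩ : ∃ g'', g = g'' + 1 := ⟨g - 1, by omega⟩
      have hlenf : (p :: rest).length + fcM mem ≤ f := hf
      have hfe : f = (p :: rest).length + (f - (p :: rest).length) := by omega
      rcases levelRel b0 b1 n cost (p :: rest) (f - (p :: rest).length) [] seen mem hR hfr
          (by simp) with ⟨hEL, hLA⟩ | ⟨nxt, s', m', k, hEL, hLA, hr, hn, hlen, hfm, hfs⟩
      · simp only [List.map_nil, List.append_nil] at hLA
        rw [hfe, hLA]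
        simp only [levels, hEL]
      · simp only [List.map_nil, List.append_nil] at hLA
        rw [hfe, hLA]
        simp only [levels, hEL]
        have hlen' : nxt.length = k := by simpa using hlen
        cases nxt with
        | nil =>
          simp only [List.map_nil, loopA_nil, levels_nil]
        | cons q qs =>
          have hk : 1 ≤ k := by
            simp only [List.length_cons] at hlen'
            omega
          have hb1 : (q :: qs).length + fcM m' ≤ f - (p :: rest).length := by
            have e1 : (q :: qs).length = k := hlen'
            have e2 : (p :: rest).length + fcM mem ≤ f := hlenf
            omega
          have hb2 : 1 + fcS s' ≤ g' := by omega
          have hb3 : fcS s' < fc := by omega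
          exact SIH (fcS s') hb3 (q :: qs) (cost + 1) s' m'
            (f - ((p :: rest).length)) g' hr rfl (fun r hp => (hn r hp).1) hb1 hb2

-- the initial scans agree (n ≥ 1)
theorem init_rel (b : List Int) (n : Nat) (hn : 1 ≤ n) :
    initSideA b n = startFloor b (column b n) := by
  unfold initSideA startFloor
  by_cases hb : b.getD 0 0 = 1
  · rw [if_pos hb, if_pos hb, column_getD b n 0 (by omega)]
    cases hup : findUpA b n 0 with
    | none =>
      have hcs : colSpec b n 0 = -1 := by
        simp only [colSpec]
        rw [hb, hup]
        by_cases hr : (0 : Nat) = n - 1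
        · rw [if_pos ⟨by norm_num, hr⟩]
        · rw [if_neg (fun hh => hr hh.2)]
          simp [encUp]
      rw [hcs]
      simp
    | some j =>
      have hjn : j + 1 < n := findUpA_lt _ _ _ _ hup
      have hr : ¬ ((0 : Nat) = n - 1) := fun h => by
        have h0 : findUpA b n 0 = none := by rw [findUpA]; simp; omega
        rw [h0] at hup; cases hup
      have hcs : colSpec b n 0 = ((j : Int)) := by
        simp only [colSpec]
        rw [hb, hup]
        rw [if_neg (fun hh => hr hh.2)]
        rw [if_neg (by norm_num : ¬ (1 : Int) = 0), if_pos (rfl : (1 : Int) = 1)]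
        simp only [encUp]
        rw [if_neg (by omega : ¬ j = n)]
        simp
      rw [hcs]
      rw [if_neg (by omega : ¬ ((j : Int)) = -1)]
      simp
  · rw [if_neg hb, if_neg hb]

theorem initSideA_lt (b : List Int) (n s : Nat) (hn : 1 ≤ n)
    (h : initSideA b n = some s) : s < n := by
  unfold initSideA at h
  split at h
  · have := findUpA_lt b n 0 s h; omega
  · cases h; omega

theorem RV_init (n s0 s1 : Nat) (h0 : s0 < n) (h1 : s1 < n) :
    RV n (((List.replicate (2 * n) false).set (2 * s0) true).set (2 * s1 + 1) true)
      ((List.replicate n false).set s0 true, (List.replicate n false).set s1 true) := by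
  refine ⟨by simp, by simp, by simp, ?_⟩
  intro t v ht hv
  have hrepD : ∀ (k m : Nat), (List.replicate m false).getD k false = false := by
    intro k m
    rw [List.getD_eq_getElem?_getD, List.getElem?_replicate]
    split <;> simp
  rw [getD_set_true, getD_set_true]
  simp only [List.length_set, List.length_replicate, hrepD]
  interval_cases t
  · show _ = ((List.replicate n false).set s0 true).getD v false
    rw [getD_set_true]
    simp only [List.length_replicate, hrepD]
    rw [if_neg (show ¬ (2 * s1 + 1 = 2 * v + 0 ∧ 2 * s1 + 1 < 2 * n) by omega)]
    by_cases hve : s0 = v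
    · rw [if_pos (show 2 * s0 = 2 * v + 0 ∧ 2 * s0 < 2 * n by omega),
        if_pos (show s0 = v ∧ s0 < n from ⟨hve, h0⟩)]
    · rw [if_neg (show ¬ (2 * s0 = 2 * v + 0 ∧ 2 * s0 < 2 * n) by omega),
        if_neg (show ¬ (s0 = v ∧ s0 < n) from fun h => hve h.1)]
  · show _ = ((List.replicate n false).set s1 true).getD v false
    rw [getD_set_true]
    simp only [List.length_replicate, hrepD]
    rw [if_neg (show ¬ (2 * s0 = 2 * v + 1 ∧ 2 * s0 < 2 * n) by omega)]
    by_cases hve : s1 = v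
    · rw [if_pos (show 2 * s1 + 1 = 2 * v + 1 ∧ 2 * s1 + 1 < 2 * n by omega),
        if_pos (show s1 = v ∧ s1 < n from ⟨hve, h1⟩)]
    · rw [if_neg (show ¬ (2 * s1 + 1 = 2 * v + 1 ∧ 2 * s1 + 1 < 2 * n) by omega),
        if_neg (show ¬ (s1 = v ∧ s1 < n) from fun h => hve h.1)]

-- ===== VERDICT (by name: the statement is the Claim_ definition above) =====
theorem min_jumps_to_roof_spec : Claim_equal_min_jumps_to_roof := by
  intro n a b _ hpre
  obtain ⟨hn, _, _, _, _⟩ := hpre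
  have hnn : 1 ≤ n.toNat := by omega
  unfold Spec_min_jumps_to_roof min_jumps_to_roof min_jumps_to_roof_alt
  dsimp only
  rw [← init_rel a n.toNat hnn, ← init_rel b n.toNat hnn]
  cases h0 : initSideA a n.toNat with
  | none => rfl
  | some s0 =>
    cases h1 : initSideA b n.toNat with
    | none => rfl
    | some s1 =>
      dsimp only
      have hs0 := initSideA_lt a n.toNat s0 hnn h0
      have hs1 := initSideA_lt b n.toNat s1 hnn h1
      have hR := RV_init n.toNat s0 s1 hs0 hs1
      have hfM : fcM ((List.replicate n.toNat false).set s0 true,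
          (List.replicate n.toNat false).set s1 true) ≤ 2 * n.toNat := by
        have a1 := List.count_le_length (l := (List.replicate n.toNat false).set s0 true) (a := false)
        have a2 := List.count_le_length (l := (List.replicate n.toNat false).set s1 true) (a := false)
        simp [List.length_set, List.length_replicate] at a1 a2
        simp [fcM]; omega
      have hfS : fcS (((List.replicate (2 * n.toNat) false).set (2 * s0) true).set (2 * s1 + 1) true) ≤ 2 * n.toNat := by
        have a1 := List.count_le_length
          (l := ((List.replicate (2 * n.toNat) false).set (2 * s0) true).set (2 * s1 + 1) true) (a := false)
        simp [List.length_set, List.length_replicate] at a1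
        simp [fcS]; omega
      have hsim := simLoop a b n.toNat
        (fcS (((List.replicate (2 * n.toNat) false).set (2 * s0) true).set (2 * s1 + 1) true))
        [(0, s0), (1, s1)] 0
        (((List.replicate (2 * n.toNat) false).set (2 * s0) true).set (2 * s1 + 1) true)
        ((List.replicate n.toNat false).set s0 true, (List.replicate n.toNat false).set s1 true)
        (2 * n.toNat + 4) (2 * n.toNat + 4)
        hR rfl (by intro p hp; simp at hp; rcases hp with h | h <;> simp [h])
        (by simp; omega) (by omega)
      simp only [List.map_cons, List.map_nil] at hsim
      rw [hsim]
      cases h2 : levels (column a n.toNat) (column b n.toNat) n.toNat (2 * n.toNat + 4) 0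
          [(0, s0), (1, s1)]
          (((List.replicate (2 * n.toNat) false).set (2 * s0) true).set (2 * s1 + 1) true) with
      | none => norm_num
      | some c =>
        simp only []
        rw [if_pos (show Int.ofNat c ≥ 0 from Int.natCast_nonneg c)]
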